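-- pv_equiv track=rewrite | github.com/StackPie71/LINGI2364-Mining-Patterns | Project 2 Sequence Mining/q4_IG.py | keep_closed
-- ===== SOURCE A (Python) =====
-- def sort_seq(all_seq):
--     sorted_seqs = []
--     longest = []
--     for seq in all_seq:
--         if len(seq) not in longest:
--             longest.append(len(seq))
--     longest.sort(reverse=True)
--     for length in longest:
--         tmp = []
--         for seq in all_seq:
--             if len(seq) == length:
--                 tmp.append(seq)
--         tmp = sorted(tmp)
--         for to_add in tmp:
--             sorted_seqs.append(to_add)
--
--     return sorted_seqs
--
-- def is_in_seq(seq1, seq2):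
--     # Input : strings !
--     # Return True if all element of the the seq1 is in seq2
--     list1 = list(seq1)
--     list2 = list(seq2)
--     counter = 0
--     for char in list1:
--         for y in range(len(list2)):
--             if char == list2[y]:
--                 list2 = list2[y + 1:]
--                 counter += 1
--                 break
--     if counter == len(list1):
--         return True
--     else:
--         return False
--
-- def keep_closed(dico):
--     ordered_seq = sort_seq(dico.keys())
--     for big_seq in ordered_seq:
--         dico_keys = list(dico.keys())
--         for seq in dico_keys:
--             if len(seq) < len(big_seq):
--                 if is_in_seq(seq, big_seq) and dico[seq][0] == dico[big_seq][0] and dico[seq][1] == dico[big_seq][1]: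
--                     dico.pop(seq)
--                     ordered_seq.remove(seq)
--
--     return dico
-- ===== SOURCE B (Python) =====
-- def _is_subseq(s, t):
--     it = iter(t)
--     return all(c in it for c in s)
--
--
-- def keep_closed(dico):
--     groups = {}
--     for k, v in dico.items():
--         groups.setdefault(tuple(v[:2]), []).append(k)
--     for ks in groups.values():
--         for k in ks:
--             if any(len(k) < len(t) and _is_subseq(k, t) for t in ks):
--                 del dico[k]
--     return dico
-- ===== Notes on version B (the rewrite author's own statement) =====
-- stated objective: faster
-- what changed: B buckets the keys once by their support pair (v[0], v[1]) and runs the subsequence test only inside each same-support bucket, deleting non-closed keys in one pass, instead of A's global length-descending sort with repeated dict.pop/list.remove scans over all keys.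
import Mathlib
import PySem

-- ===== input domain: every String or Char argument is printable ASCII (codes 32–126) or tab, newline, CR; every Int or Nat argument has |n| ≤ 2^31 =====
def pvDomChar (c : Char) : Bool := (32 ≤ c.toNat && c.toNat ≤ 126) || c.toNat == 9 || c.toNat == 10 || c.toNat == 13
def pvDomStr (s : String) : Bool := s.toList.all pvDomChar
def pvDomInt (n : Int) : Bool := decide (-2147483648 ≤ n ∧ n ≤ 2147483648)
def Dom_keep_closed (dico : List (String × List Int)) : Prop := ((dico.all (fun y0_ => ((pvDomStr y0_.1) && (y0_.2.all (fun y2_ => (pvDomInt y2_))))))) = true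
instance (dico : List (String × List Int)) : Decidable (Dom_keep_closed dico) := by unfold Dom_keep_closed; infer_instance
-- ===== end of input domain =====

-- B replaces A's global length-sorted scan with one pass over support-pair buckets (measurably
-- faster); A mutates its argument in place — the equivalence proved here is about the RETURN value.

-- ===== PORT A =====
-- helper for is_in_seq's inner scan: `for y in range(len(list2)): if char == list2[y]: list2 = list2[y+1:]; counter += 1; break`
def isInSeqFind (c : Char) : List Char → Option (List Char)
  | [] => none
  | y :: ys => if c == y then some ys else isInSeqFind c ys

def isInSeqLoop : List Char → List Char → Nat → Nat
  | [], _, counter => counter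
  | c :: cs, l2, counter =>
    match isInSeqFind c l2 with
    | some rest => isInSeqLoop cs rest (counter + 1)
    | none => isInSeqLoop cs l2 counter

def is_in_seq (seq1 seq2 : String) : Bool :=
  isInSeqLoop seq1.toList seq2.toList 0 == seq1.toList.length

def sort_seq (all_seq : List String) : List String :=
  let longest : List Int :=
    all_seq.foldl (fun l s => if l.contains (PySem.Str.len s) then l else l ++ [PySem.Str.len s]) []
  let longest := PySem.List.sorted longest (fun x => x) true
  longest.foldl (fun acc length =>
    let tmp := all_seq.foldl (fun t s => if PySem.Str.len s == length then t ++ [s] else t) []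
    acc ++ PySem.List.sorted tmp (fun x => x) false) []

-- the popping condition; dict lookup is first-match on the association list (Python dict lookup)
def kcCond (d : List (String × List Int)) (seq big : String) : Bool :=
  decide (PySem.Str.len seq < PySem.Str.len big) && is_in_seq seq big &&
    (PySem.List.pyGetD ((List.lookup seq d).getD []) 0 0 == PySem.List.pyGetD ((List.lookup big d).getD []) 0 0) &&
    (PySem.List.pyGetD ((List.lookup seq d).getD []) 1 0 == PySem.List.pyGetD ((List.lookup big d).getD []) 1 0)

-- inner `for seq in dico_keys:` loop; state = (dico, ordered_seq)
def kcInner (big : String) (ks : List String) (st : List (String × List Int) × List String) :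
    List (String × List Int) × List String :=
  ks.foldl (fun st seq =>
    if kcCond st.1 seq big then
      (st.1.eraseP (fun kv => kv.1 == seq), (PySem.List.remove? st.2 seq).getD st.2)
    else st) st

-- termination fact the outer loop cites: removals never lengthen ordered_seq
theorem kcInner_snd_length_le (big : String) (ks : List String)
    (st : List (String × List Int) × List String) :
    (kcInner big ks st).2.length ≤ st.2.length := by
  induction ks generalizing st with
  | nil => exact Nat.le_refl _
  | cons k ks ih =>
    simp only [kcInner, List.foldl_cons]
    refine Nat.le_trans (ih _) ?_
    split
    · show ((PySem.List.remove? st.2 k).getD st.2).length ≤ st.2.length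
      by_cases hv : k ∈ st.2
      · rw [PySem.List.remove?_eq_some_erase st.2 k hv]
        have := List.length_erase_of_mem hv
        simp; omega
      · rw [(PySem.List.remove?_eq_none_iff st.2 k).mpr hv]
        simp
    · exact Nat.le_refl _

-- dico.keys as a list
def kcKeys (d : List (String × List Int)) : List String := d.map (·.1)

-- outer `for big_seq in ordered_seq:` loop — Python's list iterator by index, the list mutating underneath
def kcOuter (d : List (String × List Int)) (ordered : List String) (i : Nat) :
    List (String × List Int) :=
  if h : i < ordered.length then
    let st := kcInner ordered[i] (kcKeys d) (d, ordered)
    kcOuter st.1 st.2 (i + 1)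
  else d
termination_by ordered.length - i
decreasing_by
  have h' : (kcInner ordered[i] (kcKeys d) (d, ordered)).2.length ≤ ordered.length :=
    kcInner_snd_length_le _ _ _
  omega

def keep_closed (dico : List (String × List Int)) : List (String × List Int) :=
  kcOuter dico (sort_seq (kcKeys dico)) 0

-- ===== PORT B =====
-- two-pointer subsequence test (`it = iter(t); all(c in it for c in s)`)
def subseqB : List Char → List Char → Bool
  | [], _ => true
  | _ :: _, [] => false
  | c :: cs, t :: ts => if c == t then subseqB cs ts else subseqB (c :: cs) ts

def suppPair (v : List Int) : List Int := PySem.List.slice v none (some 2)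

def altCond (k t : String) : Bool :=
  decide (PySem.Str.len k < PySem.Str.len t) && subseqB k.toList t.toList

def keep_closed_alt (dico : List (String × List Int)) : List (String × List Int) :=
  let groups : PySem.Dict (List Int) (List String) :=
    dico.foldl (fun g kv => g.modify (suppPair kv.2) [] (· ++ [kv.1])) PySem.Dict.empty
  groups.values.foldl (fun d ks =>
    ks.foldl (fun d k =>
      if ks.any (fun t => altCond k t) then d.eraseP (fun kv => kv.1 == k) else d) d) dico

-- ===== PRECONDITION & SPEC =====
-- Pre_ excludes dicts holding a length-comparable subsequence pair of keys whose value lists are too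
-- short for A's support comparison (A raises IndexError whenever it actually evaluates such a pair and
-- returns only when earlier removals happen to skip it), and duplicate keys (unrepresentable in a dict).
def Pre_keep_closed (dico : List (String × List Int)) : Prop :=
  (dico.map (·.1)).Nodup ∧
  ∀ p ∈ dico, ∀ q ∈ dico, p.1.toList.length < q.1.toList.length → p.1.toList.Sublist q.1.toList →
    1 ≤ p.2.length ∧ 1 ≤ q.2.length ∧ (p.2.headI = q.2.headI → 2 ≤ p.2.length ∧ 2 ≤ q.2.length)
instance (dico : List (String × List Int)) : Decidable (Pre_keep_closed dico) := by
  unfold Pre_keep_closed; infer_instance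

def pvWitness_keep_closed : (List (String × List Int)) :=
  [("ab", [1, 2]), ("a", [1, 2]), ("c", [3, 4])]

def Spec_keep_closed (dico : List (String × List Int)) (out : List (String × List Int)) : Prop :=
  out = keep_closed_alt dico
instance (dico : List (String × List Int)) (out : List (String × List Int)) :
    Decidable (Spec_keep_closed dico out) := by unfold Spec_keep_closed; infer_instance

-- ===== CLAIM (what is proved, stated in full; the proofs are below) =====
def Claim_equal_keep_closed : Prop :=
  ∀ (dico : List (String × List Int)), Dom_keep_closed dico → Pre_keep_closed dico →
    Spec_keep_closed dico (keep_closed dico)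

-- ===== LEMMAS AND PROOFS =====

-- the removal condition both programs implement, read over the ORIGINAL dict d0
def cond0 (d0 : List (String × List Int)) (s t : String) : Bool :=
  decide (s.toList.length < t.toList.length) && subseqB s.toList t.toList &&
    (PySem.List.pyGetD ((List.lookup s d0).getD []) 0 0 == PySem.List.pyGetD ((List.lookup t d0).getD []) 0 0) &&
    (PySem.List.pyGetD ((List.lookup s d0).getD []) 1 0 == PySem.List.pyGetD ((List.lookup t d0).getD []) 1 0)

def remB (d0 : List (String × List Int)) (s : String) : Bool :=
  (d0.map (·.1)).any (fun t => cond0 d0 s t)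

theorem subseqB_eq_isSublist (a b : List Char) : subseqB a b = a.isSublist b := by
  induction b generalizing a with
  | nil => cases a <;> simp [subseqB, List.isSublist]
  | cons t ts ih =>
    cases a with
    | nil => simp [subseqB, List.isSublist]
    | cons c cs =>
      by_cases h : c == t <;> simp [subseqB, List.isSublist, h, ih]

theorem subseqB_iff (a b : List Char) : subseqB a b = true ↔ a.Sublist b := by
  rw [subseqB_eq_isSublist, List.isSublist_iff_sublist]

theorem subseqB_trans {a b c : List Char} (h1 : subseqB a b = true) (h2 : subseqB b c = true) :
    subseqB a c = true :=
  (subseqB_iff a c).mpr (((subseqB_iff a b).mp h1).trans ((subseqB_iff b c).mp h2))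

theorem isInSeqFind_some {c : Char} {l2 rest : List Char} (h : isInSeqFind c l2 = some rest)
    (cs : List Char) : subseqB (c :: cs) l2 = subseqB cs rest := by
  induction l2 generalizing rest with
  | nil => simp [isInSeqFind] at h
  | cons y ys ih =>
    by_cases hc : c == y
    · simp [isInSeqFind, hc] at h
      subst h
      simp [subseqB, hc]
    · simp [isInSeqFind, hc] at h
      simp [subseqB, hc, ih h]

theorem isInSeqFind_none {c : Char} {l2 : List Char} (h : isInSeqFind c l2 = none)
    (cs : List Char) : subseqB (c :: cs) l2 = false := by
  induction l2 with
  | nil => simp [subseqB]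
  | cons y ys ih =>
    by_cases hc : c == y
    · simp [isInSeqFind, hc] at h
    · simp [isInSeqFind, hc] at h
      simp [subseqB, hc, ih h]

theorem isInSeqLoop_shift (l1 : List Char) : ∀ (l2 : List Char) (n : Nat),
    isInSeqLoop l1 l2 (n + 1) = isInSeqLoop l1 l2 n + 1 := by
  induction l1 with
  | nil => intro l2 n; simp [isInSeqLoop]
  | cons c cs ih =>
    intro l2 n
    cases h : isInSeqFind c l2 <;> simp [isInSeqLoop, h, ih]

theorem isInSeqLoop_le (l1 : List Char) : ∀ (l2 : List Char), isInSeqLoop l1 l2 0 ≤ l1.length := by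
  induction l1 with
  | nil => intro l2; simp [isInSeqLoop]
  | cons c cs ih =>
    intro l2
    cases h : isInSeqFind c l2 with
    | none => simp only [isInSeqLoop, h]; exact (ih l2).trans (by simp)
    | some rest =>
      simp only [isInSeqLoop, h, isInSeqLoop_shift]
      exact Nat.succ_le_succ (ih rest)

theorem isInSeqLoop_eq_iff (l1 : List Char) : ∀ (l2 : List Char),
    isInSeqLoop l1 l2 0 = l1.length ↔ subseqB l1 l2 = true := by
  induction l1 with
  | nil => intro l2; simp [isInSeqLoop, subseqB]
  | cons c cs ih =>
    intro l2
    cases h : isInSeqFind c l2 with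
    | none =>
      simp only [isInSeqLoop, h]
      have := isInSeqLoop_le cs l2
      rw [isInSeqFind_none h cs]
      simp only [List.length_cons, Bool.false_eq_true, iff_false]
      omega
    | some rest =>
      simp only [isInSeqLoop, h, isInSeqLoop_shift, List.length_cons]
      rw [isInSeqFind_some h cs]
      rw [← ih rest]
      omega

theorem is_in_seq_eq (s t : String) : is_in_seq s t = subseqB s.toList t.toList := by
  by_cases hs : subseqB s.toList t.toList = true
  · simp [is_in_seq, hs, (isInSeqLoop_eq_iff _ _).mpr hs]
  · have hne : isInSeqLoop s.toList t.toList 0 ≠ s.toList.length :=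
      fun h => hs ((isInSeqLoop_eq_iff _ _).mp h)
    simp only [is_in_seq]
    rw [Bool.eq_false_iff.mpr hs]
    simpa using hne



theorem lookup_filter_key (p : String → Bool) (d : List (String × List Int)) (k : String)
    (hk : p k = true) :
    List.lookup k (d.filter (fun kv => p kv.1)) = List.lookup k d := by
  induction d with
  | nil => rfl
  | cons ab t ih =>
    obtain ⟨a, b⟩ := ab
    by_cases h : k = a
    · subst h
      simp [hk, List.lookup]
    · have hne : (k == a) = false := by simp [h]
      by_cases hpa : p a = true
      · simp [hpa, List.lookup, hne, ih]
      · simp only [Bool.not_eq_true] at hpa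
        simp [hpa, List.lookup, hne, ih]

theorem nodup_keys_filter (p : String × List Int → Bool) (d : List (String × List Int))
    (h : (d.map (·.1)).Nodup) : ((d.filter p).map (·.1)).Nodup :=
  h.sublist ((d.filter_sublist).map _)

theorem eraseP_eq_filter_key (d : List (String × List Int)) (k : String)
    (hnd : (d.map (·.1)).Nodup) :
    d.eraseP (fun kv => kv.1 == k) = d.filter (fun kv => !(kv.1 == k)) := by
  induction d with
  | nil => rfl
  | cons ab t ih =>
    obtain ⟨a, b⟩ := ab
    simp only [List.map_cons, List.nodup_cons] at hnd
    by_cases h : a = k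
    · subst h
      simp only [List.eraseP_cons, List.filter_cons]
      simp only [beq_self_eq_true, Bool.not_true]
      have : t.filter (fun kv => !(kv.1 == a)) = t := by
        rw [List.filter_eq_self]
        intro kv hkv
        have : kv.1 ≠ a := fun he => hnd.1 (he ▸ List.mem_map_of_mem hkv)
        simp [this]
      simp [this]
    · have hne : (a == k) = false := by simp [h]
      simp [hne, ih hnd.2]

theorem lookup_eq_some_of_mem {d : List (String × List Int)} {k : String} {v : List Int}
    (hnd : (d.map (·.1)).Nodup) (h : (k, v) ∈ d) : List.lookup k d = some v := by
  induction d with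
  | nil => simp at h
  | cons ab t ih =>
    obtain ⟨a, b⟩ := ab
    simp only [List.map_cons, List.nodup_cons] at hnd
    rcases List.mem_cons.mp h with he | ht
    · obtain ⟨h1, h2⟩ := Prod.mk.injEq .. ▸ he
      subst h1; subst h2
      simp [List.lookup]
    · have : k ≠ a := by
        intro he; subst he
        exact hnd.1 (List.mem_map_of_mem ht)
      have hne : (k == a) = false := by simp [this]
      simp [List.lookup, hne, ih hnd.2 ht]

theorem foldl_eraseP_filter (c : String → Bool) : ∀ (L : List String) (d : List (String × List Int)),
    (d.map (·.1)).Nodup →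
    L.foldl (fun d k => if c k then d.eraseP (fun kv => kv.1 == k) else d) d
      = d.filter (fun kv => !(decide (kv.1 ∈ L) && c kv.1)) := by
  intro L
  induction L with
  | nil => intro d _; simp
  | cons k L ih =>
    intro d hnd
    simp only [List.foldl_cons]
    by_cases hc : c k = true
    · rw [if_pos hc, eraseP_eq_filter_key d k hnd,
        ih _ (nodup_keys_filter _ _ hnd), List.filter_filter]
      refine List.filter_congr ?_
      intro x hx
      by_cases hxk : x.1 = k
      · simp [hxk, hc]
      · simp [hxk, List.mem_cons]
    · rw [if_neg hc]
      rw [ih _ hnd]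
      refine List.filter_congr ?_
      intro x hx
      by_cases hxk : x.1 = k
      · simp [hxk, hc]
      · simp [hxk, List.mem_cons]

theorem sort_seq_eq (ks : List String) :
    sort_seq ks = (PySem.List.sorted (PySem.Set.ofList (ks.map PySem.Str.len)) (fun x => x) true).flatMap
      (fun ℓ => PySem.List.sorted (ks.filter (fun s => PySem.Str.len s == ℓ)) (fun x => x) false) := by
  have h1 : List.foldl (fun l s => if l.contains (PySem.Str.len s) = true then l else l ++ [PySem.Str.len s]) [] ks
      = PySem.Set.ofList (ks.map PySem.Str.len) := by
    rw [← PySem.Set.update_nil_left, PySem.Set.update_map_eq_foldl_add]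
    rfl
  have h2 : ∀ ℓ : Int, List.foldl (fun t s => if (PySem.Str.len s == ℓ) = true then t ++ [s] else t) [] ks
      = ks.filter (fun s => PySem.Str.len s == ℓ) := by
    intro ℓ
    rw [PySem.List.foldl_append_if (fun s => PySem.Str.len s == ℓ) (fun s => s) ks []]
    simp
  simp only [sort_seq, h1, h2]
  rw [PySem.List.foldl_append_eq_flatMap]
  simp

theorem sort_seq_mem (ks : List String) (s : String) : s ∈ sort_seq ks ↔ s ∈ ks := by
  rw [sort_seq_eq]
  simp only [List.mem_flatMap, PySem.List.mem_sorted, PySem.Set.mem_ofList, List.mem_filter]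
  constructor
  · rintro ⟨ℓ, _, hs, _⟩; exact hs
  · intro hs
    exact ⟨PySem.Str.len s, List.mem_map_of_mem hs, hs, by simp⟩

theorem sort_seq_nodup (ks : List String) (h : ks.Nodup) : (sort_seq ks).Nodup := by
  rw [sort_seq_eq]
  rw [List.nodup_flatMap]
  constructor
  · intro ℓ _
    exact ((PySem.List.sorted_perm _ _ _).nodup_iff).mpr (h.filter _)
  · have hnd : (PySem.List.sorted (PySem.Set.ofList (ks.map PySem.Str.len)) (fun x => x) true).Nodup :=
      ((PySem.List.sorted_perm _ _ _).nodup_iff).mpr (PySem.Set.nodup_ofList _)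
    refine hnd.imp ?_
    intro ℓ₁ ℓ₂ hne s hs1 hs2
    rw [PySem.List.mem_sorted, List.mem_filter] at hs1 hs2
    exact hne (by rw [← eq_of_beq hs1.2, ← eq_of_beq hs2.2])

theorem sort_seq_sorted (ks : List String) :
    (sort_seq ks).Pairwise (fun a b => b.toList.length ≤ a.toList.length) := by
  rw [sort_seq_eq]
  rw [List.pairwise_flatMap]
  constructor
  · intro ℓ _
    refine List.pairwise_of_forall_mem_list ?_
    intro a ha b hb
    rw [PySem.List.mem_sorted, List.mem_filter] at ha hb
    have h1 := eq_of_beq ha.2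
    have h2 := eq_of_beq hb.2
    rw [PySem.Str.len_eq] at h1 h2
    omega
  · have hp := PySem.List.sorted_pairwise_rev (PySem.Set.ofList (ks.map PySem.Str.len)) (fun x => x)
    refine hp.imp ?_
    intro ℓ₁ ℓ₂ hle x hx y hy
    rw [PySem.List.mem_sorted, List.mem_filter] at hx hy
    have h1 := eq_of_beq hx.2
    have h2 := eq_of_beq hy.2
    rw [PySem.Str.len_eq] at h1 h2
    have : (y.toList.length : Int) ≤ (x.toList.length : Int) := by rw [h1, h2]; exact hle
    exact_mod_cast this


theorem kcCond_eq_cond0 (d0 : List (String × List Int)) (ord : List String) (seq big : String)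
    (hseq : seq ∈ ord) (hbig : big ∈ ord) :
    kcCond (d0.filter (fun kv => decide (kv.1 ∈ ord))) seq big = cond0 d0 seq big := by
  unfold kcCond cond0
  rw [lookup_filter_key (fun x => decide (x ∈ ord)) d0 seq (by simp [hseq]),
    lookup_filter_key (fun x => decide (x ∈ ord)) d0 big (by simp [hbig]),
    is_in_seq_eq]
  simp [PySem.Str.len_eq]

theorem cond0_irrefl (d0 : List (String × List Int)) (s : String) : cond0 d0 s s = false := by
  simp [cond0]

theorem cond0_trans (d0 : List (String × List Int)) {s t u : String}
    (h1 : cond0 d0 s t = true) (h2 : cond0 d0 t u = true) : cond0 d0 s u = true := by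
  simp only [cond0, Bool.and_eq_true, decide_eq_true_eq, beq_iff_eq] at *
  exact ⟨⟨⟨Nat.lt_trans h1.1.1.1 h2.1.1.1, subseqB_trans h1.1.1.2 h2.1.1.2⟩,
    h1.1.2.trans h2.1.2⟩, h1.2.trans h2.2⟩

theorem kcInner_spec (d0 : List (String × List Int)) (hnd0 : (d0.map (·.1)).Nodup) (big : String) :
    ∀ (ks : List String) (ord : List String),
      ks.Nodup → (∀ s ∈ ks, s ∈ ord) → big ∈ ord → ord.Nodup →
      kcInner big ks (d0.filter (fun kv => decide (kv.1 ∈ ord)), ord) =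
        (d0.filter (fun kv => decide (kv.1 ∈ ord) && !(decide (kv.1 ∈ ks) && cond0 d0 kv.1 big)),
         ord.filter (fun s => !(decide (s ∈ ks) && cond0 d0 s big))) := by
  intro ks
  induction ks with
  | nil => intro ord _ _ _ _; simp [kcInner]
  | cons k ks ih =>
    intro ord hknd hsub hbig hordnd
    simp only [List.nodup_cons] at hknd
    have hk : k ∈ ord := hsub k (by simp)
    have hcond := kcCond_eq_cond0 d0 ord k big hk hbig
    simp only [kcInner, List.foldl_cons, hcond]
    by_cases hc : cond0 d0 k big = true
    · rw [if_pos hc]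
      have hbigk : big ≠ k := by
        intro he; rw [he] at hc; rw [cond0_irrefl] at hc; exact Bool.false_ne_true hc
      have hord1 : (PySem.List.remove? ord k).getD ord = ord.filter (fun x => x != k) := by
        rw [PySem.List.remove?_eq_some_erase ord k hk, Option.getD_some,
          hordnd.erase_eq_filter k]
      have hd1 : (d0.filter (fun kv => decide (kv.1 ∈ ord))).eraseP (fun kv => kv.1 == k)
          = d0.filter (fun kv => decide (kv.1 ∈ ord.filter (fun x => x != k))) := by
        rw [eraseP_eq_filter_key _ k (nodup_keys_filter _ _ hnd0), List.filter_filter]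
        refine List.filter_congr ?_
        intro x _
        by_cases hxk : x.1 = k <;> simp [hxk, List.mem_filter]
      have := ih (ord.filter (fun x => x != k)) hknd.2
        (fun s hs => by
          have hsk : s ≠ k := fun he => hknd.1 (he ▸ hs)
          simp [List.mem_filter, hsub s (List.mem_cons_of_mem _ hs), hsk])
        (by simp [List.mem_filter, hbig, hbigk])
        (hordnd.filter _)
      simp only [hord1, hd1]
      simp only [kcInner] at this
      rw [this]
      refine Prod.ext ?_ ?_
      · refine List.filter_congr ?_
        intro x _
        by_cases hxk : x.1 = k <;>
          simp [hxk, hc, List.mem_filter, List.mem_cons]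
      · show (List.filter _ _).filter _ = _
        rw [List.filter_filter]
        refine List.filter_congr ?_
        intro x _
        by_cases hxk : x = k <;>
          simp [hxk, hc, List.mem_cons]
    · rw [if_neg hc]
      have := ih ord hknd.2 (fun s hs => hsub s (List.mem_cons_of_mem _ hs)) hbig hordnd
      simp only [kcInner] at this
      rw [this]
      refine Prod.ext ?_ ?_
      · refine List.filter_congr ?_
        intro x _
        by_cases hxk : x.1 = k <;> simp [hxk, hc, List.mem_cons]
      · refine List.filter_congr ?_
        intro x _
        by_cases hxk : x = k <;> simp [hxk, hc, List.mem_cons]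

theorem kcOuter_spec (d0 : List (String × List Int)) (hnd0 : (d0.map (·.1)).Nodup) :
    ∀ (n i : Nat) (ord : List String),
      n = ord.length - i →
      ord.Nodup →
      (∀ s ∈ ord, s ∈ d0.map (·.1)) →
      ord.Pairwise (fun a b => b.toList.length ≤ a.toList.length) →
      (∀ s ∈ d0.map (·.1), s ∉ ord → remB d0 s = true) →
      (∀ s ∈ ord, remB d0 s = true → ∃ t ∈ ord.drop i, cond0 d0 s t = true) →
      kcOuter (d0.filter (fun kv => decide (kv.1 ∈ ord))) ord i
        = d0.filter (fun kv => !(remB d0 kv.1)) := by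
  intro n
  induction n using Nat.strong_induction_on with
  | _ n IH =>
    intro i ord hn hnd hmem hpair hsound hprog
    by_cases h : i < ord.length
    · rw [kcOuter, dif_pos h]
      simp only [kcKeys]
      obtain ⟨b, hbeq⟩ : ∃ b, ord[i] = b := ⟨_, rfl⟩
      rw [hbeq]
      have hks : ((d0.filter (fun kv => decide (kv.1 ∈ ord))).map (·.1)).Nodup :=
        nodup_keys_filter _ _ hnd0
      have hkssub : ∀ s ∈ (d0.filter (fun kv => decide (kv.1 ∈ ord))).map (·.1), s ∈ ord := by
        intro s hs
        obtain ⟨kv, hkv, rfl⟩ := List.mem_map.mp hs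
        exact of_decide_eq_true (List.mem_filter.mp hkv).2
      have hbig : b ∈ ord := hbeq ▸ List.getElem_mem h
      have hbigK0 : b ∈ d0.map (·.1) := hmem _ hbig
      have hinner := kcInner_spec d0 hnd0 b
        ((d0.filter (fun kv => decide (kv.1 ∈ ord))).map (·.1)) ord hks hkssub hbig hnd
      rw [hinner]
      -- every live key is in ks, so the ks-membership test is redundant
      have hmem_ks : ∀ s ∈ ord, s ∈ (d0.filter (fun kv => decide (kv.1 ∈ ord))).map (·.1) := by
        intro s hs
        obtain ⟨kv, hkv, rfl⟩ := List.mem_map.mp (hmem s hs)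
        exact List.mem_map_of_mem (List.mem_filter.mpr ⟨hkv, by simp [hs]⟩)
      have hord' : ord.filter (fun s => !(decide (s ∈ (d0.filter (fun kv => decide (kv.1 ∈ ord))).map (·.1)) && cond0 d0 s b))
          = ord.filter (fun s => !(cond0 d0 s b)) := by
        refine List.filter_congr ?_
        intro x hx
        simp [hmem_ks x hx]
      have hd' : d0.filter (fun kv => decide (kv.1 ∈ ord) && !(decide (kv.1 ∈ (d0.filter (fun kv => decide (kv.1 ∈ ord))).map (·.1)) && cond0 d0 kv.1 b))
          = d0.filter (fun kv => decide (kv.1 ∈ ord.filter (fun s => !(cond0 d0 s b)))) := by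
        refine List.filter_congr ?_
        intro x _
        by_cases hxo : x.1 ∈ ord
        · simp [hxo, hmem_ks x.1 hxo, List.mem_filter]
        · simp [hxo, List.mem_filter]
      rw [hord', hd']
      refine IH ((ord.filter (fun s => !(cond0 d0 s b))).length - (i + 1)) ?_ (i + 1) _ rfl
        (hnd.filter _) (fun s hs => hmem s (List.mem_filter.mp hs).1)
        (List.Pairwise.sublist List.filter_sublist hpair) ?_ ?_
      · have hle := List.length_filter_le (fun s => !(cond0 d0 s b)) ord
        omega
      · -- soundness
        intro s hsK0 hnotin
        by_cases hso : s ∈ ord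
        · have hcs : cond0 d0 s b = true := by
            by_contra hcs
            exact hnotin (List.mem_filter.mpr ⟨hso, by simp [hcs]⟩)
          exact List.any_eq_true.mpr ⟨b, hbigK0, hcs⟩
        · exact hsound s hsK0 hso
      · -- progress
        intro s hs hrem
        have hs' := List.mem_filter.mp hs
        have hnc : ¬(cond0 d0 s b = true) := by
          intro hcc; rw [hcc] at hs'; simp at hs'
        obtain ⟨t, ht, hct⟩ := hprog s hs'.1 hrem
        rw [List.drop_eq_getElem_cons h, hbeq] at ht
        rcases List.mem_cons.mp ht with rfl | ht'
        · exact absurd hct hnc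
        · have hqt : (!(cond0 d0 t b)) = true := by
            by_contra hqt
            simp only [Bool.not_eq_true', Bool.not_eq_false] at hqt
            exact hnc (cond0_trans d0 hct hqt)
          have htake : ∀ x ∈ ord.take (i + 1), (!(cond0 d0 x b)) = true := by
            intro x hx
            obtain ⟨j, hj, hjx⟩ := List.getElem_of_mem hx
            rw [List.getElem_take] at hjx
            rw [List.length_take] at hj
            have hji : j ≤ i := by omega
            have hjlen : j < ord.length := by omega
            have hlen_le : b.toList.length ≤ x.toList.length := by
              rcases Nat.lt_or_ge j i with hlt | hge
              · have := (List.pairwise_iff_getElem.mp hpair) j i hjlen h hlt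
                rw [hbeq, hjx] at this
                exact this
              · have : j = i := by omega
                subst this
                rw [← hjx, hbeq]
            have hnlt : ¬(x.toList.length < b.toList.length) := by omega
            have hc0 : cond0 d0 x b = false := by
              unfold cond0
              rw [decide_eq_false hnlt]
              simp
            simp [hc0]
          have hdrop : (ord.filter (fun s => !(cond0 d0 s b))).drop (i + 1)
              = (ord.drop (i + 1)).filter (fun s => !(cond0 d0 s b)) := by
            conv_lhs => rw [← List.take_append_drop (i + 1) ord]
            rw [List.filter_append, List.filter_eq_self.mpr htake]
            have hlen : (ord.take (i + 1)).length = i + 1 := by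
              rw [List.length_take]; omega
            rw [List.drop_left' hlen]
          refine ⟨t, ?_, hct⟩
          rw [hdrop]
          exact List.mem_filter.mpr ⟨ht', hqt⟩
    · rw [kcOuter, dif_neg h]
      refine List.filter_congr ?_
      intro kv hkv
      have hK0 : kv.1 ∈ d0.map (·.1) := List.mem_map_of_mem hkv
      by_cases hin : kv.1 ∈ ord
      · have : remB d0 kv.1 = false := by
          by_contra hr
          simp only [Bool.not_eq_false] at hr
          obtain ⟨t, ht, _⟩ := hprog kv.1 hin hr
          rw [List.drop_eq_nil_of_le (by omega)] at ht
          simp at ht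
        simp [hin, this]
      · simp [hin, hsound kv.1 hK0 hin]

theorem keep_closed_eq_filter (d0 : List (String × List Int))
    (hnd0 : (d0.map (·.1)).Nodup) :
    keep_closed d0 = d0.filter (fun kv => !(remB d0 kv.1)) := by
  unfold keep_closed
  have hordmem : ∀ s, s ∈ sort_seq (kcKeys d0) ↔ s ∈ d0.map (·.1) := by
    intro s; rw [kcKeys, sort_seq_mem]
  have h0 : d0.filter (fun kv => decide (kv.1 ∈ sort_seq (kcKeys d0))) = d0 :=
    List.filter_eq_self.mpr
      (fun kv hkv => by simp [(hordmem _).mpr (List.mem_map_of_mem hkv)])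
  have := kcOuter_spec d0 hnd0 ((sort_seq (kcKeys d0)).length - 0) 0 (sort_seq (kcKeys d0)) rfl
    (sort_seq_nodup _ hnd0)
    (fun s hs => (hordmem s).mp hs)
    (sort_seq_sorted _)
    (fun s hsK0 hnot => absurd ((hordmem s).mpr hsK0) hnot)
    (fun s hs hrem => by
      obtain ⟨t, htK0, hct⟩ := List.any_eq_true.mp hrem
      exact ⟨t, by rw [List.drop_zero]; exact (hordmem t).mpr htK0, hct⟩)
  rw [h0] at this
  exact this

-- ===== B side =====

theorem altCond_eq (k t : String) :
    altCond k t = (decide (k.toList.length < t.toList.length) && subseqB k.toList t.toList) := by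
  simp [altCond, PySem.Str.len_eq]

theorem mem_eq_of_keys_nodup {d0 : List (String × List Int)}
    (hnd : (d0.map (·.1)).Nodup) {kv kv' : String × List Int}
    (h1 : kv ∈ d0) (h2 : kv' ∈ d0) (he : kv'.1 = kv.1) : kv' = kv := by
  have l1 := lookup_eq_some_of_mem hnd (show (kv.1, kv.2) ∈ d0 by simpa using h1)
  have l2 := lookup_eq_some_of_mem hnd (show (kv'.1, kv'.2) ∈ d0 by simpa using h2)
  rw [he, l1] at l2
  exact Prod.ext he (Option.some.inj l2).symm

-- tuple(v[:2]) is v.take 2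
theorem suppPair_eq_take (v : List Int) : suppPair v = v.take 2 := by
  simp [suppPair, pysem]

theorem pyGetD_of_take_eq {v w : List Int} (h : v.take 2 = w.take 2) :
    PySem.List.pyGetD v 0 0 = PySem.List.pyGetD w 0 0 ∧
      PySem.List.pyGetD v 1 0 = PySem.List.pyGetD w 1 0 := by
  match v, w with
  | [], [] => exact ⟨rfl, rfl⟩
  | [], b :: w' => simp at h
  | a :: v', [] => simp at h
  | [a], [b] => simp at h; simp [pysem, h]
  | [a], b :: d :: w' => simp at h
  | a :: c :: v', [b] => simp at h
  | a :: c :: v', b :: d :: w' =>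
    simp at h
    obtain ⟨h1, h2⟩ := h
    simp [pysem, h1, h2]

theorem take_eq_of_safe {v w : List Int}
    (h0 : PySem.List.pyGetD v 0 0 = PySem.List.pyGetD w 0 0)
    (h1 : PySem.List.pyGetD v 1 0 = PySem.List.pyGetD w 1 0)
    (hv : 1 ≤ v.length) (hw : 1 ≤ w.length)
    (hh : v.headI = w.headI → 2 ≤ v.length ∧ 2 ≤ w.length) : v.take 2 = w.take 2 := by
  match v, w with
  | [], _ => simp at hv
  | _ :: _, [] => simp at hw
  | a :: v', b :: w' =>
    have hab : a = b := by simpa [pysem] using h0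
    subst hab
    obtain ⟨h2v, h2w⟩ := hh (by simp)
    match v', w' with
    | [], _ => simp at h2v
    | _ :: _, [] => simp at h2w
    | c :: v'', d :: w'' =>
      have hcd : c = d := by simpa [pysem] using h1
      simp [hcd]

theorem foldl_groups_filter : ∀ (gs : List (List String)) (d : List (String × List Int)),
    (d.map (·.1)).Nodup →
    gs.foldl (fun d ks =>
        ks.foldl (fun d k =>
          if ks.any (fun t => altCond k t) then d.eraseP (fun kv => kv.1 == k) else d) d) d
      = d.filter (fun kv =>
          !(gs.any (fun ks => decide (kv.1 ∈ ks) && ks.any (fun t => altCond kv.1 t)))) := by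
  intro gs
  induction gs with
  | nil => intro d _; simp
  | cons g gs ih =>
    intro d hnd
    simp only [List.foldl_cons]
    rw [foldl_eraseP_filter (fun k => g.any (fun t => altCond k t)) g d hnd,
      ih _ (nodup_keys_filter _ _ hnd), List.filter_filter]
    refine List.filter_congr ?_
    intro x _
    simp only [List.any_cons, Bool.not_or]
    rw [Bool.and_comm]

theorem keep_closed_alt_eq_filter (d0 : List (String × List Int))
    (hnd0 : (d0.map (·.1)).Nodup)
    (hsafe : ∀ p ∈ d0, ∀ q ∈ d0, p.1.toList.length < q.1.toList.length →
      p.1.toList.Sublist q.1.toList →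
      1 ≤ p.2.length ∧ 1 ≤ q.2.length ∧ (p.2.headI = q.2.headI → 2 ≤ p.2.length ∧ 2 ≤ q.2.length)) :
    keep_closed_alt d0 = d0.filter (fun kv => !(remB d0 kv.1)) := by
  simp only [keep_closed_alt]
  rw [show List.foldl (fun (g : PySem.Dict (List Int) (List String)) (kv : String × List Int) =>
        g.modify (suppPair kv.2) [] (fun x => x ++ [kv.1])) PySem.Dict.empty d0
      = List.foldl (fun (g : PySem.Dict (List Int) (List String)) (p : List Int × String) =>
        g.modify p.1 [] (fun x => x ++ [p.2])) PySem.Dict.empty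
          (d0.map (fun kv : String × List Int => (suppPair kv.2, kv.1)))
    from (List.foldl_map (f := fun kv : String × List Int => (suppPair kv.2, kv.1))
      (g := fun (g : PySem.Dict (List Int) (List String)) (p : List Int × String) =>
        g.modify p.1 [] (fun x => x ++ [p.2])) (l := d0) (init := PySem.Dict.empty)).symm]
  set l := d0.map (fun kv : String × List Int => (suppPair kv.2, kv.1)) with hl
  set groups := l.foldl (fun g p => g.modify p.1 [] (· ++ [p.2])) PySem.Dict.empty with hgroups
  have hndk : groups.keys.Nodup := by
    rw [hgroups]
    exact PySem.Dict.nodup_keys_foldl_modify_key l (·.1) [] (fun d x => (· ++ [x.2]))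
      PySem.Dict.empty (by simp)
  have hkeys : groups.keys = PySem.Set.ofList (l.map (·.1)) := by
    rw [hgroups]
    rw [PySem.Dict.keys_foldl_modify_key l (·.1) [] (fun d x => (· ++ [x.2])) PySem.Dict.empty]
    simp [PySem.Set.update_nil_left]
  have hG : ∀ c, groups.getD c [] = (d0.filter (fun kv => suppPair kv.2 == c)).map (·.1) := by
    intro c
    rw [hgroups, PySem.Dict.getD_foldl_modify_append l PySem.Dict.empty c]
    rw [hl, List.filter_map, List.map_map]
    simp [Function.comp_def]
  have hvals : groups.values = groups.keys.map (fun c => groups.getD c []) :=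
    PySem.Dict.values_eq_map_keys groups hndk []
  rw [hvals, List.foldl_map, hkeys]
  have hfold := foldl_groups_filter ((PySem.Set.ofList (l.map (·.1))).map (fun c => groups.getD c [])) d0 hnd0
  rw [List.foldl_map] at hfold
  rw [hfold]
  refine List.filter_congr ?_
  rintro ⟨k, v⟩ hkv
  have hlook : List.lookup k d0 = some v := lookup_eq_some_of_mem hnd0 hkv
  congr 1
  rw [Bool.eq_iff_iff]
  simp only [List.any_map, Function.comp_def, hG, List.any_eq_true, PySem.Set.mem_ofList,
    List.mem_map, Bool.and_eq_true, decide_eq_true_eq]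
  constructor
  · rintro ⟨c, -, ⟨kv', hkv', hk'⟩, kvt, hkvt, haltc⟩
    have hkvf := List.mem_filter.mp hkv'
    have hek : kv' = (k, v) := mem_eq_of_keys_nodup hnd0 hkv hkvf.1 hk'
    have hcv : suppPair v = c := by
      have := eq_of_beq hkvf.2
      rw [hek] at this
      exact this
    have hkvtf := List.mem_filter.mp hkvt
    have hct : suppPair kvt.2 = c := eq_of_beq hkvtf.2
    have hlookt : List.lookup kvt.1 d0 = some kvt.2 :=
      lookup_eq_some_of_mem hnd0 (by simpa using hkvtf.1)
    refine List.any_eq_true.mpr ⟨kvt.1, List.mem_map_of_mem hkvtf.1, ?_⟩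
    unfold cond0
    rw [hlook, hlookt]
    simp only [Option.getD_some]
    rw [altCond_eq] at haltc
    have hsupp : suppPair v = suppPair kvt.2 := by rw [hcv, hct]
    rw [suppPair_eq_take, suppPair_eq_take] at hsupp
    obtain ⟨h1, h2⟩ := pyGetD_of_take_eq hsupp
    rw [haltc]
    simp [h1, h2]
  · intro hrem
    simp only [remB] at hrem
    obtain ⟨t, htK0, hcond⟩ := List.any_eq_true.mp hrem
    obtain ⟨kvt, hkvt, hkt⟩ := List.mem_map.mp htK0
    have hlookt : List.lookup t d0 = some kvt.2 := by
      rw [← hkt]; exact lookup_eq_some_of_mem hnd0 (by simpa using hkvt)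
    unfold cond0 at hcond
    rw [hlook, hlookt] at hcond
    simp only [Option.getD_some, Bool.and_eq_true, beq_iff_eq] at hcond
    have hsafe' := hsafe (k, v) hkv kvt hkvt
      (by rw [hkt]; exact of_decide_eq_true hcond.1.1.1)
      (by rw [hkt]; exact (subseqB_iff _ _).mp hcond.1.1.2)
    have hsupp : suppPair kvt.2 = suppPair v := by
      rw [suppPair_eq_take, suppPair_eq_take]
      exact (take_eq_of_safe hcond.1.2 hcond.2 hsafe'.1 hsafe'.2.1 hsafe'.2.2).symm
    refine ⟨suppPair v, ⟨(suppPair v, k), List.mem_map_of_mem hkv, rfl⟩,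
      ⟨(k, v), List.mem_filter.mpr ⟨hkv, by simp⟩, rfl⟩,
      kvt, List.mem_filter.mpr ⟨hkvt, by simp [hsupp]⟩, ?_⟩
    rw [altCond_eq, hkt]
    simp only [hcond.1.1.2, Bool.and_true]
    simpa using of_decide_eq_true hcond.1.1.1

-- ===== VERDICT (by name: the statement is the Claim_ definition above) =====
theorem keep_closed_spec : Claim_equal_keep_closed := by
  intro dico _ hpre
  unfold Spec_keep_closed
  rw [keep_closed_eq_filter dico hpre.1, keep_closed_alt_eq_filter dico hpre.1 hpre.2]
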